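-- pv_equiv track=rewrite | github.com/RobinCarlosIA/IA2DOPARCIAL_ENFOQUE_GRAFOS | Inteligencia Artificial 2.1.3 Enfoque en probabilidad/2.1.3.46_Detección de Aristas y Segmentación.py | detectar_aristas_y_segmentar
-- ===== SOURCE A (Python) =====
-- def detectar_aristas_y_segmentar(lista_nombres):
--     # Creamos un diccionario para guardar las relaciones entre nombres
--     relaciones = {}
--     # Creamos dos listas para almacenar los segmentos de nombres
--     nombres_cortos = []  # Para nombres con menos de 7 letras
--     nombres_largos = []  # Para nombres con 7 letras o más
--
--     # Iteramos sobre la lista de nombres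
--     for nombre in lista_nombres:
--         # Establecemos relaciones con otros nombres
--         for otro_nombre in lista_nombres:
--             if nombre != otro_nombre:  # Evitamos la relación consigo mismo
--                 # Agregamos el nombre a la lista de relaciones
--                 if nombre not in relaciones:
--                     relaciones[nombre] = []  # Inicializamos la lista de relaciones
--                 relaciones[nombre].append(otro_nombre)  # Agregamos el otro nombre
--
--         # Segmentamos los nombres según su longitud
--         if len(nombre) < 7:  # Si el nombre tiene menos de 7 letras
--             nombres_cortos.append(nombre)  # Agregamos a la lista de nombres cortos
--         else:  # Si el nombre tiene 7 letras o más
--             nombres_largos.append(nombre)  # Agregamos a la lista de nombres largos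
--
--     return relaciones, nombres_cortos, nombres_largos  # Devolvemos las relaciones y segmentos
-- ===== SOURCE B (Python) =====
-- def detectar_aristas_y_segmentar(lista_nombres):
--     # One counting pass, then one construction pass over distinct names.
--     counts = {}
--     for n in lista_nombres:
--         counts[n] = counts.get(n, 0) + 1
--     relaciones = {}
--     for name in counts:  # distinct names in first-occurrence order
--         others = [x for x in lista_nombres if x != name]
--         if others:
--             relaciones[name] = others * counts[name]
--     nombres_cortos = [n for n in lista_nombres if len(n) < 7]
--     nombres_largos = [n for n in lista_nombres if len(n) >= 7]
--     return relaciones, nombres_cortos, nombres_largos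
-- ===== Notes on version B (the rewrite author's own statement) =====
-- stated objective: alternative
-- what changed: Replaces A's interleaved nested re-appending loop by a counting pass over the list followed by a construction pass over distinct names (the others-list is built once per distinct name and repeated count times, instead of re-appended element-by-element per occurrence), with the length split done by two comprehensions.
import Mathlib
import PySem

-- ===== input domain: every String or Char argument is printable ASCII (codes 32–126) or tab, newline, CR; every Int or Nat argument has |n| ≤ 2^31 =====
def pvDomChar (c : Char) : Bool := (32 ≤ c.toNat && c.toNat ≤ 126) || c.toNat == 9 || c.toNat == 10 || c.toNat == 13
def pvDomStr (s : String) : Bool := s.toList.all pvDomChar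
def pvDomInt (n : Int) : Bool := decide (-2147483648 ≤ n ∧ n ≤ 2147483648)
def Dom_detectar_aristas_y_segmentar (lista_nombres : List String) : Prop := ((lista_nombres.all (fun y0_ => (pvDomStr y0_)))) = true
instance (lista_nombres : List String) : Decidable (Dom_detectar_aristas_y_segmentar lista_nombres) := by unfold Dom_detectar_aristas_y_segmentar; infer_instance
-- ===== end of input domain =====

-- B replaces A's interleaved nested re-appending loop by a counting pass plus one construction pass
-- over distinct names (objective: alternative decomposition, same results).


-- ===== PORT A =====
-- literal transliteration of A: one outer loop over the names carrying the state
-- (relaciones, nombres_cortos, nombres_largos); the inner loop appends each distinct other name,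
-- creating the key with [] first when absent ('relaciones[nombre].append(otro)' = modify with default []).
def detectar_aristas_y_segmentar (lista_nombres : List String) : (List (String × List String)) × List String × List String :=
  let res := lista_nombres.foldl (fun s nombre =>
    let rel := lista_nombres.foldl (fun rel otro =>
      if nombre ≠ otro then
        let rel := if rel.contains nombre then rel else rel.insert nombre []
        rel.modify nombre [] (fun v => v ++ [otro])
      else rel) s.1
    if PySem.Str.len nombre < 7 then (rel, s.2.1 ++ [nombre], s.2.2)
    else (rel, s.2.1, s.2.2 ++ [nombre]))
    ((PySem.Dict.empty : PySem.Dict String (List String)), ([] : List String), ([] : List String))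
  (res.1.items, res.2.1, res.2.2)

-- ===== PORT B =====
-- transliteration of Source B: counting pass, then a pass over the distinct names (= keys of counts);
-- counts[name] is ported as getD (the key is always present when read).
def detectar_aristas_y_segmentar_alt (lista_nombres : List String) : (List (String × List String)) × List String × List String :=
  let counts := lista_nombres.foldl (fun d n => d.insert n (d.getD n 0 + 1))
    (PySem.Dict.empty : PySem.Dict String Int)
  let relaciones := counts.keys.foldl (fun r name =>
      let others := lista_nombres.filter (fun x => decide (x ≠ name))
      if others ≠ [] then r.insert name (PySem.List.pyRepeat others (counts.getD name 0)) else r)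
    (PySem.Dict.empty : PySem.Dict String (List String))
  (relaciones.items,
   lista_nombres.filter (fun n => decide (PySem.Str.len n < 7)),
   lista_nombres.filter (fun n => decide (7 ≤ PySem.Str.len n)))

-- ===== PRECONDITION & SPEC =====
def Spec_detectar_aristas_y_segmentar (lista_nombres : List String) (out : (List (String × List String)) × List String × List String) : Prop := out = detectar_aristas_y_segmentar_alt lista_nombres
instance (lista_nombres : List String) (out : (List (String × List String)) × List String × List String) : Decidable (Spec_detectar_aristas_y_segmentar lista_nombres out) := by unfold Spec_detectar_aristas_y_segmentar; infer_instance

-- ===== CLAIM (what is proved, stated in full; the proofs are below) =====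
def Claim_equal_detectar_aristas_y_segmentar : Prop := ∀ (lista_nombres : List String), Dom_detectar_aristas_y_segmentar lista_nombres → Spec_detectar_aristas_y_segmentar lista_nombres (detectar_aristas_y_segmentar lista_nombres)

-- ===== LEMMAS AND PROOFS =====

-- two modifies at the same key with default [] compose
theorem pv_modify_modify (d : PySem.Dict String (List String)) (n : String)
    (f g : List String → List String) :
    (d.modify n [] f).modify n [] g = d.modify n [] (fun v => g (f v)) := by
  simp [PySem.Dict.modify, PySem.Dict.insert_insert_self, PySem.Dict.getD_insert_self]

-- A's inner-loop body (create-if-absent then append) is one modify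
theorem pv_g_eq (d : PySem.Dict String (List String)) (n : String) (o : String) :
    (if d.contains n then d else d.insert n []).modify n [] (fun v => v ++ [o])
      = d.modify n [] (fun v => v ++ [o]) := by
  by_cases h : d.contains n = true
  · simp [h]
  · simp only [Bool.not_eq_true] at h
    simp [h, PySem.Dict.modify, PySem.Dict.insert_insert_self, PySem.Dict.getD_insert_self,
      PySem.Dict.getD_of_not_contains _ _ h]

-- A's inner loop over the already-filtered others appends them all in one modify
theorem pv_inner_fold (n : String) (fl : List String) (d : PySem.Dict String (List String)) :
    fl.foldl (fun rel otro =>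
        (if rel.contains n then rel else rel.insert n []).modify n [] (fun v => v ++ [otro])) d
      = if fl = [] then d else d.modify n [] (fun v => v ++ fl) := by
  induction fl generalizing d with
  | nil => rfl
  | cons o t ih =>
    rw [List.foldl_cons, pv_g_eq, ih]
    cases t with
    | nil => simp
    | cons b u => simp [pv_modify_modify]

-- getD through a loop of modifies: each occurrence of m appends one copy of fl m
theorem pv_getD_fold (fl : String → List String) (l : List String)
    (d : PySem.Dict String (List String)) (m : String) :
    (l.foldl (fun d nm => d.modify nm [] (fun v => v ++ fl nm)) d).getD m []
      = d.getD m [] ++ (List.replicate (l.count m) (fl m)).flatten := by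
  induction l generalizing d with
  | nil => simp
  | cons n t ih =>
    simp only [List.foldl_cons, ih]
    by_cases h : m = n
    · subst h
      simp [List.replicate_succ]
    · have hnm : ¬ n = m := fun hh => h hh.symm
      simp [PySem.Dict.getD_modify, h, hnm]

-- set(filter) = filter(set) for a pointwise predicate
theorem pv_ofList_filter (p : String → Bool) (l : List String) :
    PySem.Set.ofList (l.filter p) = (PySem.Set.ofList l).filter p := by
  induction l with
  | nil => rfl
  | cons x xs ih =>
    by_cases h : p x = true
    · simp only [List.filter_cons, h, if_pos, PySem.Set.ofList_cons, ih, PySem.Set.discard,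
        List.filter_filter]
      refine congrArg _ (List.filter_congr fun a _ => ?_)
      exact Bool.and_comm _ _
    · simp only [Bool.not_eq_true] at h
      rw [List.filter_cons, PySem.Set.ofList_cons, List.filter_cons]
      simp only [h, Bool.false_eq_true, if_false]
      rw [ih]
      simp only [PySem.Set.discard, List.filter_filter]
      refine (List.filter_congr fun a _ => ?_).symm
      by_cases hax : a = x <;> simp [hax, h]

-- the outer A-loop splits into three independent folds (given a collapsed inner loop Amod)
theorem pv_A_step (lista : List String)
    (Amod : PySem.Dict String (List String) → String → PySem.Dict String (List String))
    (hA : ∀ d n, n ∈ lista → lista.foldl (fun rel otro =>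
      if n ≠ otro then
        (if rel.contains n then rel else rel.insert n []).modify n [] (fun v => v ++ [otro])
      else rel) d = Amod d n) :
    lista.foldl (fun s nombre =>
      let rel := lista.foldl (fun rel otro =>
        if nombre ≠ otro then
          (if rel.contains nombre then rel else rel.insert nombre []).modify nombre [] (fun v => v ++ [otro])
        else rel) s.1
      if PySem.Str.len nombre < 7 then (rel, s.2.1 ++ [nombre], s.2.2)
      else (rel, s.2.1, s.2.2 ++ [nombre]))
      ((PySem.Dict.empty : PySem.Dict String (List String)), ([] : List String), ([] : List String))
    = (lista.foldl Amod PySem.Dict.empty,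
       lista.foldl (fun c n => if PySem.Str.len n < 7 then c ++ [n] else c) [],
       lista.foldl (fun lg n => if PySem.Str.len n < 7 then lg else lg ++ [n]) []) := by
  have hc := PySem.List.foldl_congr_mem (l := lista)
      (init := ((PySem.Dict.empty : PySem.Dict String (List String)), ([] : List String), ([] : List String)))
      (f := fun s nombre =>
        let rel := lista.foldl (fun rel otro =>
          if nombre ≠ otro then
            (if rel.contains nombre then rel else rel.insert nombre []).modify nombre [] (fun v => v ++ [otro])
          else rel) s.1
        if PySem.Str.len nombre < 7 then (rel, s.2.1 ++ [nombre], s.2.2)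
        else (rel, s.2.1, s.2.2 ++ [nombre]))
      (g := fun s n =>
        (Amod s.1 n,
         (fun t (n : String) => (if PySem.Str.len n < 7 then t.1 ++ [n] else t.1,
            if PySem.Str.len n < 7 then t.2 else t.2 ++ [n])) s.2 n))
      (by intro acc x hx
          dsimp only
          rw [hA acc.1 x hx]
          by_cases hl : PySem.Str.len x < 7
          · simp only [if_pos hl]
          · simp only [if_neg hl])
  rw [hc]
  rw [PySem.List.foldl_prod_mk (f := Amod)
      (g := fun t (n : String) => (if PySem.Str.len n < 7 then t.1 ++ [n] else t.1,
        if PySem.Str.len n < 7 then t.2 else t.2 ++ [n]))]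
  rw [PySem.List.foldl_prod_mk (f := fun c (n : String) => if PySem.Str.len n < 7 then c ++ [n] else c)
      (g := fun lg (n : String) => if PySem.Str.len n < 7 then lg else lg ++ [n])]

-- ===== VERDICT (by name: the statement is the Claim_ definition above) =====
theorem detectar_aristas_y_segmentar_spec : Claim_equal_detectar_aristas_y_segmentar := by
  intro lista _
  unfold Spec_detectar_aristas_y_segmentar detectar_aristas_y_segmentar detectar_aristas_y_segmentar_alt
  dsimp only
  -- collapse A's inner loop into a single conditional modify
  have hA : ∀ (d : PySem.Dict String (List String)) n, n ∈ lista →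
      lista.foldl (fun rel otro =>
        if n ≠ otro then
          (if rel.contains n then rel else rel.insert n []).modify n [] (fun v => v ++ [otro])
        else rel) d
      = (if lista.filter (fun o => decide (n ≠ o)) = [] then d
         else d.modify n [] (fun v => v ++ lista.filter (fun o => decide (n ≠ o)))) := by
    intro d n _
    rw [PySem.List.foldl_ite_eq_foldl_filter (p := fun otro => n ≠ otro)
        (f := fun (rel : PySem.Dict String (List String)) otro =>
          (if rel.contains n then rel else rel.insert n []).modify n [] (fun v => v ++ [otro]))]
    exact pv_inner_fold n _ d
  rw [pv_A_step lista _ hA]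
  -- name the per-name others list and the nonemptiness test
  simp only [Prod.mk.injEq]
  refine ⟨?_, ?_, ?_⟩
  -- 1) the relation dicts
  · -- A side: drop the no-op names, leaving a pure modify loop over the filtered list
    have hflip := PySem.List.foldl_congr_mem (l := lista) (init := (PySem.Dict.empty : PySem.Dict String (List String)))
      (f := fun d n => if lista.filter (fun o => decide (n ≠ o)) = [] then d
         else d.modify n [] (fun v => v ++ lista.filter (fun o => decide (n ≠ o))))
      (g := fun d n => if lista.filter (fun o => decide (n ≠ o)) ≠ [] then
          d.modify n [] (fun v => v ++ lista.filter (fun o => decide (n ≠ o))) else d)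
      (by intro acc x _
          dsimp only
          by_cases hx : lista.filter (fun o => decide (x ≠ o)) = []
          · rw [if_pos hx, if_neg (fun hcon => hcon hx)]
          · rw [if_neg hx, if_pos hx])
    rw [hflip,
      PySem.List.foldl_ite_eq_foldl_filter (p := fun n => lista.filter (fun o => decide (n ≠ o)) ≠ [])
        (f := fun (d : PySem.Dict String (List String)) n =>
          d.modify n [] (fun v => v ++ lista.filter (fun o => decide (n ≠ o))))]
    -- B side: counts is Counter(lista), its keys are the distinct names
    rw [PySem.Dict.foldl_insert_getD_add_one_eq_counter, PySem.Dict.keys_counter]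
    have hswap : ∀ n : String, lista.filter (fun x => decide (x ≠ n)) = lista.filter (fun o => decide (n ≠ o)) :=
      fun n => List.filter_congr (fun a _ => by rw [decide_eq_decide]; exact ne_comm)
    have hcB := PySem.List.foldl_congr_mem (l := PySem.Set.ofList lista)
      (init := (PySem.Dict.empty : PySem.Dict String (List String)))
      (f := fun r name => if lista.filter (fun x => decide (x ≠ name)) ≠ [] then
          r.insert name (PySem.List.pyRepeat (lista.filter (fun x => decide (x ≠ name)))
            ((PySem.Dict.counter lista).getD name 0)) else r)
      (g := fun r name => if lista.filter (fun o => decide (name ≠ o)) ≠ [] then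
          r.insert name (PySem.List.pyRepeat (lista.filter (fun o => decide (name ≠ o)))
            ((PySem.Dict.counter lista).getD name 0)) else r)
      (by intro acc x _; dsimp only; rw [hswap x])
    rw [hcB,
      PySem.List.foldl_ite_eq_foldl_filter (p := fun name => lista.filter (fun o => decide (name ≠ o)) ≠ [])
        (f := fun (r : PySem.Dict String (List String)) name =>
          r.insert name (PySem.List.pyRepeat (lista.filter (fun o => decide (name ≠ o)))
          ((PySem.Dict.counter lista).getD name 0)))]
    -- characterise both dicts over the same key list
    have hnodB : ((PySem.Set.ofList lista).filter
        (fun n => decide (lista.filter (fun o => decide (n ≠ o)) ≠ []))).Nodup :=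
      (PySem.Set.nodup_ofList lista).filter _
    have hkeysA : ((lista.filter (fun n => decide (lista.filter (fun o => decide (n ≠ o)) ≠ []))).foldl
        (fun d n => d.modify n [] (fun v => v ++ lista.filter (fun o => decide (n ≠ o))))
        (PySem.Dict.empty : PySem.Dict String (List String))).keys
        = (PySem.Set.ofList lista).filter (fun n => decide (lista.filter (fun o => decide (n ≠ o)) ≠ [])) := by
      rw [PySem.Dict.keys_foldl_modify (d0 := ([] : List String))
        (f := fun _ n => fun v => v ++ lista.filter (fun o => decide (n ≠ o)))]
      rw [PySem.Dict.keys_empty, PySem.Set.update_nil_left, pv_ofList_filter]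
    have hnodA := hkeysA ▸ hnodB
    rw [PySem.Dict.items_eq_map_keys _ hnodA ([] : List String), hkeysA]
    rw [PySem.Dict.items_foldl_insert_fresh _ (fun a => a)
        (fun name => PySem.List.pyRepeat (lista.filter (fun o => decide (name ≠ o)))
          ((PySem.Dict.counter lista).getD name 0)) _
        (by intro a _; simp [PySem.Dict.contains_empty])
        (by simpa using hnodB)]
    show List.map _ _ = PySem.Dict.items PySem.Dict.empty ++ _
    rw [show (PySem.Dict.empty : PySem.Dict String (List String)).items = [] from rfl, List.nil_append]
    refine List.map_congr_left fun k hk => ?_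
    have hq : decide (lista.filter (fun o => decide (k ≠ o)) ≠ []) = true := (List.mem_filter.mp hk).2
    rw [pv_getD_fold (fl := fun n => lista.filter (fun o => decide (n ≠ o)))]
    rw [PySem.Dict.getD_empty, List.nil_append]
    rw [List.count_filter (p := fun n => decide (lista.filter (fun o => decide (n ≠ o)) ≠ []))
        (a := k) (l := lista) hq, PySem.Dict.getD_counter]
    simp [PySem.List.pyRepeat]
  -- 2) the short names
  · rw [PySem.List.foldl_append_ite_eq_filter (p := fun n => PySem.Str.len n < 7), List.nil_append]
  -- 3) the long names
  · have hflipL := PySem.List.foldl_congr_mem (l := lista) (init := ([] : List String))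
      (f := fun lg n => if PySem.Str.len n < 7 then lg else lg ++ [n])
      (g := fun lg n => if ¬ PySem.Str.len n < 7 then lg ++ [n] else lg)
      (by intro acc x _
          dsimp only
          by_cases hl : PySem.Str.len x < 7
          · rw [if_pos hl, if_neg (not_not_intro hl)]
          · rw [if_neg hl, if_pos hl])
    rw [hflipL, PySem.List.foldl_append_ite_eq_filter (p := fun n => ¬ PySem.Str.len n < 7), List.nil_append]
    exact List.filter_congr fun a _ => by rw [decide_eq_decide]; omega
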